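-- pv_equiv track=rewrite | github.com/salomon3-coder/howcanihack | scripts/refresh_index_and_sitemap.py | dedupe_articles
-- ===== SOURCE A (Python) =====
-- def _article_key(a: dict) -> str:
--     url = (a.get("url") or "").strip()
--     if url:
--         return url
--     slug = (a.get("slug") or "").strip()
--     cat = (a.get("category") or "").strip()
--     if slug and cat:
--         return f"/{cat}/{slug}.html"
--     return slug
--
-- def dedupe_articles(articles: list) -> list[dict]:
--     """One entry per URL/slug; keep the row with the latest date string."""
--     best: dict[str, dict] = {}
--     for a in articles:
--         if not isinstance(a, dict):
--             continue
--         key = _article_key(a)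
--         if not key:
--             continue
--         d = a.get("date") or ""
--         prev = best.get(key)
--         if prev is None or d >= (prev.get("date") or ""):
--             best[key] = a
--     out = sorted(best.values(), key=lambda x: x.get("date", ""), reverse=True)
--     return out
-- ===== SOURCE B (Python) =====
-- from collections import defaultdict
--
--
-- def _article_key(a: dict) -> str:
--     url = (a.get("url") or "").strip()
--     if url:
--         return url
--     slug = (a.get("slug") or "").strip()
--     cat = (a.get("category") or "").strip()
--     if slug and cat:
--         return f"/{cat}/{slug}.html"
--     return slug
--
--
-- def dedupe_articles(articles: list) -> list[dict]:
--     """Build buckets per key first, then collapse each bucket to its winner."""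
--     groups = defaultdict(list)
--     for a in articles:
--         if not isinstance(a, dict):
--             continue
--         key = _article_key(a)
--         if key:
--             groups[key].append(a)
--     winners = []
--     for bucket in groups.values():
--         best = bucket[0]
--         for cur in bucket[1:]:
--             if (cur.get("date") or "") >= (best.get("date") or ""):
--                 best = cur
--         winners.append(best)
--     return sorted(winners, key=lambda x: x.get("date", ""), reverse=True)
-- ===== Notes on version B (the rewrite author's own statement) =====
-- stated objective: alternative
-- what changed: Replaces A's single running-best dict pass with a build-then-reduce decomposition: first group all valid articles into per-key buckets (defaultdict(list)), then collapse each bucket to its winner with the same 'date >= best date' rule, then sort.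
import Mathlib
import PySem

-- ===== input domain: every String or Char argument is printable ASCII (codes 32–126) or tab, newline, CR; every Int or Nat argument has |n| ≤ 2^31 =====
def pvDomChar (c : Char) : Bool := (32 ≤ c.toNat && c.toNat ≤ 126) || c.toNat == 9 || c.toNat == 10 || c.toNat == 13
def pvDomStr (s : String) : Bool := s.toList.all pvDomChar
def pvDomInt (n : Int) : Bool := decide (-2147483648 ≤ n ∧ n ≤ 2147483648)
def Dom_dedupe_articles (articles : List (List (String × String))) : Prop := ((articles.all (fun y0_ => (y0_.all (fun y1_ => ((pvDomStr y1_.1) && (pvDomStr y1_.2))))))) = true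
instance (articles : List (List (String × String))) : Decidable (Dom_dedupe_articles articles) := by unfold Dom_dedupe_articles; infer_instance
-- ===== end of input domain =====

-- B changes the decomposition: one grouping pass into per-key buckets, then each bucket is
-- collapsed to its winner with the same `>=` rule, instead of A's single running-best-dict pass
-- (objective: alternative; same cost, no speed claim).

-- shared module helper: `x.get(k) or ""` / `x.get(k, "")` on a string-valued dict (identical values)
def pvGetD (a : List (String × String)) (k : String) : String :=
  (PySem.Dict.mk a).getD k ""

-- shared module helper _article_key (used verbatim by both Pythons)
def pvArticleKey (a : List (String × String)) : String :=
  let url := PySem.Str.strip (pvGetD a "url")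
  if url ≠ "" then url
  else
    let slug := PySem.Str.strip (pvGetD a "slug")
    let cat := PySem.Str.strip (pvGetD a "category")
    if slug ≠ "" ∧ cat ≠ "" then "/" ++ cat ++ "/" ++ slug ++ ".html"
    else slug

-- ===== PORT A =====
-- body of A's `for a in articles` loop over the running-best dict
def pvStepA (best : PySem.Dict String (List (String × String))) (a : List (String × String)) :
    PySem.Dict String (List (String × String)) :=
  let key := pvArticleKey a
  if key = "" then best
  else
    let d := pvGetD a "date"
    match best.get? key with
    | none => best.insert key a
    | some prev => if pvGetD prev "date" ≤ d then best.insert key a else best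

def dedupe_articles (articles : List (List (String × String))) : List (List (String × String)) :=
  let best := articles.foldl pvStepA PySem.Dict.empty
  PySem.List.sorted best.values (fun x => pvGetD x "date") true

-- ===== PORT B =====
-- body of B's grouping loop: groups[key].append(a)  (defaultdict(list))
def pvStepB (groups : PySem.Dict String (List (List (String × String))))
    (a : List (String × String)) : PySem.Dict String (List (List (String × String))) :=
  let key := pvArticleKey a
  if key = "" then groups else groups.modify key [] (· ++ [a])

-- body of B's per-bucket loop: best = bucket[0]; for cur in bucket[1:] keep cur when its date is ≥
-- (buckets are never empty in B; the [] branch is the unreachable total-function case)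
def pvReduceBucket (bucket : List (List (String × String))) : List (String × String) :=
  match bucket with
  | [] => []
  | b :: rest =>
      rest.foldl (fun best cur => if pvGetD best "date" ≤ pvGetD cur "date" then cur else best) b

def dedupe_articles_alt (articles : List (List (String × String))) : List (List (String × String)) :=
  let groups := articles.foldl pvStepB PySem.Dict.empty
  let winners := groups.values.map pvReduceBucket
  PySem.List.sorted winners (fun x => pvGetD x "date") true

-- ===== PRECONDITION & SPEC =====
def Spec_dedupe_articles (articles : List (List (String × String))) (out : List (List (String × String))) : Prop := out = dedupe_articles_alt articles
instance (articles : List (List (String × String))) (out : List (List (String × String))) : Decidable (Spec_dedupe_articles articles out) := by unfold Spec_dedupe_articles; infer_instance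

-- ===== CLAIM (what is proved, stated in full; the proofs are below) =====
def Claim_equal_dedupe_articles : Prop := ∀ (articles : List (List (String × String))), Dom_dedupe_articles articles → Spec_dedupe_articles articles (dedupe_articles articles)

-- ===== LEMMAS AND PROOFS =====

-- A's best-dict entry for a key is the reduction of B's bucket for that key
def pvRedF (p : String × List (List (String × String))) : String × List (String × String) :=
  (p.1, pvReduceBucket p.2)

lemma pvGet?_redmap (L : List (String × List (List (String × String)))) (k : String) :
    (PySem.Dict.mk (L.map pvRedF)).get? k =
      ((PySem.Dict.mk L).get? k).map pvReduceBucket := by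
  induction L with
  | nil => rfl
  | cons p rest ih =>
      obtain ⟨pk, pv⟩ := p
      simp only [List.map_cons, pvRedF, PySem.Dict.get?_mk_cons]
      by_cases h : pk == k
      · simp [h]
      · simp [h, ih]

lemma pvReduce_append (b : List (List (String × String))) (a : List (String × String))
    (hb : b ≠ []) :
    pvReduceBucket (b ++ [a]) =
      if pvGetD (pvReduceBucket b) "date" ≤ pvGetD a "date" then a
      else pvReduceBucket b := by
  match b with
  | [] => exact absurd rfl hb
  | x :: rest =>
      simp only [pvReduceBucket, List.cons_append, List.foldl_append, List.foldl_cons,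
        List.foldl_nil]

-- the loop invariant: A's dict is B's group dict with every bucket reduced
lemma pvLoopInv (l : List (List (String × String))) :
    ∀ (d : PySem.Dict String (List (String × String)))
      (g : PySem.Dict String (List (List (String × String)))),
      g.keys.Nodup → (∀ p ∈ g.items, p.2 ≠ []) → d.items = g.items.map pvRedF →
      (l.foldl pvStepA d).items = (l.foldl pvStepB g).items.map pvRedF := by
  induction l with
  | nil => intro d g _ _ h; simpa using h
  | cons a l ih =>
      intro d g hnd hne h
      have hd : d = PySem.Dict.mk (g.items.map pvRedF) := PySem.Dict.ext h
      simp only [List.foldl_cons]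
      by_cases hk : pvArticleKey a = ""
      · have hA : pvStepA d a = d := by simp [pvStepA, hk]
        have hB : pvStepB g a = g := by simp [pvStepB, hk]
        rw [hA, hB]; exact ih d g hnd hne h
      · cases hg : g.get? (pvArticleKey a) with
        | none =>
            have hcg : g.contains (pvArticleKey a) = false := by
              rw [PySem.Dict.contains_eq_isSome_get?, hg]; rfl
            have hdg : d.get? (pvArticleKey a) = none := by
              rw [hd]
              have := pvGet?_redmap g.items (pvArticleKey a)
              simpa [hg] using this
            have hcd : d.contains (pvArticleKey a) = false := by
              rw [PySem.Dict.contains_eq_isSome_get?, hdg]; rfl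
            have hA : pvStepA d a = d.insert (pvArticleKey a) a := by
              simp [pvStepA, hk, hdg]
            have hB : pvStepB g a = g.insert (pvArticleKey a) [a] := by
              have hm : pvStepB g a
                  = g.insert (pvArticleKey a) (g.getD (pvArticleKey a) [] ++ [a]) := by
                simp [pvStepB, hk]; rfl
              rw [hm, PySem.Dict.getD_of_not_contains g [] hcg]; rfl
            rw [hA, hB]
            refine ih _ _ (PySem.Dict.nodup_keys_insert _ _ _ hnd) ?_ ?_
            · intro p hp
              rw [PySem.Dict.items_insert_of_not_contains g [a] hcg] at hp
              rcases List.mem_append.mp hp with hp | hp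
              · exact hne p hp
              · simp at hp; subst hp; simp
            · rw [PySem.Dict.items_insert_of_not_contains g [a] hcg,
                PySem.Dict.items_insert_of_not_contains d a hcd, List.map_append, h]
              rfl
        | some b =>
            have hbne : b ≠ [] := hne _ (PySem.Dict.mem_items_of_get?_eq_some _ hg)
            have hcg : g.contains (pvArticleKey a) = true := by
              rw [PySem.Dict.contains_eq_isSome_get?, hg]; rfl
            have hdg : d.get? (pvArticleKey a) = some (pvReduceBucket b) := by
              rw [hd]
              have := pvGet?_redmap g.items (pvArticleKey a)
              simpa [hg] using this
            have hcd : d.contains (pvArticleKey a) = true := by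
              rw [PySem.Dict.contains_eq_isSome_get?, hdg]; rfl
            have hB : pvStepB g a = g.insert (pvArticleKey a) (b ++ [a]) := by
              have hm : pvStepB g a
                  = g.insert (pvArticleKey a) (g.getD (pvArticleKey a) [] ++ [a]) := by
                simp [pvStepB, hk]; rfl
              rw [hm, PySem.Dict.getD_of_get?_eq_some g [] hg]
            have hgi : (g.insert (pvArticleKey a) (b ++ [a])).items
                = g.items.map (fun p =>
                    if p.1 == pvArticleKey a then (pvArticleKey a, b ++ [a]) else p) :=
              PySem.Dict.items_insert_of_contains g (b ++ [a]) hcg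
            have hnd' : (g.insert (pvArticleKey a) (b ++ [a])).keys.Nodup :=
              PySem.Dict.nodup_keys_insert _ _ _ hnd
            have hne' : ∀ p ∈ (g.insert (pvArticleKey a) (b ++ [a])).items, p.2 ≠ [] := by
              intro p hp
              rw [hgi] at hp
              rcases List.mem_map.mp hp with ⟨q, hq, hqe⟩
              by_cases hq1 : q.1 == pvArticleKey a
              · rw [if_pos hq1] at hqe; rw [← hqe]; simp
              · rw [if_neg hq1] at hqe; rw [← hqe]; exact hne q hq
            by_cases hc : pvGetD (pvReduceBucket b) "date" ≤ pvGetD a "date"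
            · have hA : pvStepA d a = d.insert (pvArticleKey a) a := by
                simp [pvStepA, hk, hdg, hc]
              rw [hA, hB]
              refine ih _ _ hnd' hne' ?_
              rw [PySem.Dict.items_insert_of_contains d a hcd, hgi, h,
                List.map_map, List.map_map]
              apply List.map_congr_left
              intro p _
              by_cases hp : p.1 == pvArticleKey a
              · simp [Function.comp, pvRedF, hp, pvReduce_append b a hbne, hc]
              · simp [Function.comp, pvRedF, hp]
            · have hA : pvStepA d a = d := by
                simp [pvStepA, hk, hdg, hc]
              rw [hA, hB]
              refine ih _ _ hnd' hne' ?_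
              rw [hgi, h, List.map_map]
              apply List.map_congr_left
              intro p hp
              by_cases hp1 : p.1 == pvArticleKey a
              · have hpk : p.1 = pvArticleKey a := by simpa using hp1
                have : g.get? p.1 = some p.2 :=
                  PySem.Dict.get?_of_mem_items g hp hnd
                rw [hpk, hg] at this
                have hpb : p.2 = b := Option.some.inj this.symm
                simp [Function.comp, pvRedF, pvReduce_append b a hbne, hc,
                  hpk, hpb]
              · simp [Function.comp, pvRedF, hp1]

theorem pv_main (articles : List (List (String × String))) :
    dedupe_articles articles = dedupe_articles_alt articles := by
  unfold dedupe_articles dedupe_articles_alt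
  have h := pvLoopInv articles PySem.Dict.empty PySem.Dict.empty
    PySem.Dict.nodup_keys_empty (fun p hp => nomatch hp) (by rfl)
  have hv : (articles.foldl pvStepA PySem.Dict.empty).values
      = ((articles.foldl pvStepB PySem.Dict.empty).values).map pvReduceBucket := by
    simp only [PySem.Dict.values, h, List.map_map]
    rfl
  show PySem.List.sorted (articles.foldl pvStepA PySem.Dict.empty).values
      (fun x => pvGetD x "date") true
    = PySem.List.sorted ((articles.foldl pvStepB PySem.Dict.empty).values.map pvReduceBucket)
      (fun x => pvGetD x "date") true
  rw [hv]

-- ===== VERDICT (by name: the statement is the Claim_ definition above) =====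
theorem dedupe_articles_spec : Claim_equal_dedupe_articles := by
  intro articles _
  unfold Spec_dedupe_articles
  exact pv_main articles
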